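-- pv_equiv track=rewrite | github.com/bibymaths/pynetphorest | src/pynetworkin/netphorest_core.py | get_display_window
-- ===== SOURCE A (Python) =====
-- def get_display_window(sequence, center_idx):
--     """
--     Mimics print_peptide() in C code.
--     Always returns 11 residues: Center +/- 5.
--     """
--     start = center_idx - 5
--     end = center_idx + 6
--
--     out = []
--     for k in range(start, end):
--         if k < 0 or k >= len(sequence):
--             out.append('-')
--         else:
--             out.append(sequence[k])
--
--     # Center to lowercase
--     out[5] = out[5].lower()
--     return "".join(out)
-- ===== SOURCE B (Python) =====
-- def get_display_window(sequence, center_idx):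
--     """Boundary arithmetic + one slice instead of a per-index guarded loop."""
--     start = center_idx - 5
--     end = center_idx + 6
--     n = len(sequence)
--     left = '-' * max(0, min(end, 0) - start)
--     body = sequence[max(0, start):max(0, min(n, end))]
--     right = '-' * max(0, end - max(start, n))
--     s = left + body + right
--     return s[:5] + s[5].lower() + s[6:]
-- ===== Notes on version B (the rewrite author's own statement) =====
-- stated objective: simpler
-- what changed: Replaces the element-by-element guarded loop over range(start,end) with boundary arithmetic: one clamped slice of the sequence plus '-' padding strings on each side, then slice-based lowercasing of the center.
import Mathlib
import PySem

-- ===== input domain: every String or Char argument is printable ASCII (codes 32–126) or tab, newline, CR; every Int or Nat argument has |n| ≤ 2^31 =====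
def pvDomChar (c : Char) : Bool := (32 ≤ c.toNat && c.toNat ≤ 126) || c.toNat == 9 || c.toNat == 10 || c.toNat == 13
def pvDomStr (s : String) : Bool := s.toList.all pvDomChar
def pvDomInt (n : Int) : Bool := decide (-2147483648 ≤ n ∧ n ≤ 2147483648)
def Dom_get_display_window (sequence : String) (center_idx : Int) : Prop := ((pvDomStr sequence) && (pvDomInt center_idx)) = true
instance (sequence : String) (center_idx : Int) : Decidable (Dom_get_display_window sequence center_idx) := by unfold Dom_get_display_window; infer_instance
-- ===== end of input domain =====

-- B replaces A's per-index guarded loop by boundary arithmetic, one slice and two dash pads (objective: simpler).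

-- ===== PORT A =====
def get_display_window (sequence : String) (center_idx : Int) : String :=
  let seq := sequence.toList
  let start := center_idx - 5
  let stop := center_idx + 6
  -- the else-branch index is guarded in range, so pyGetD with any default is exact
  let out := (PySem.List.pyRange start stop 1).foldl
    (fun acc k => acc ++ [if k < 0 ∨ (seq.length : Int) ≤ k then '-'
                          else PySem.List.pyGetD seq k '-']) []
  -- out[5] = out[5].lower(); out has 11 elements, so index 5 is in range
  let out := PySem.List.pySetD out 5 (PySem.Chars.lowerChar (PySem.List.pyGetD out 5 '-'))
  String.mk out

-- ===== PORT B =====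
def get_display_window_alt (sequence : String) (center_idx : Int) : String :=
  let cs := sequence.toList
  let start := center_idx - 5
  let stop := center_idx + 6
  let n : Int := cs.length
  let left := PySem.List.pyRepeat ['-'] (max 0 (min stop 0 - start))
  let body := PySem.List.slice cs (some (max 0 start)) (some (max 0 (min n stop)))
  let right := PySem.List.pyRepeat ['-'] (max 0 (stop - max start n))
  let s := left ++ body ++ right
  -- s[:5] + s[5].lower() + s[6:]
  String.mk (PySem.List.slice s none (some 5)
             ++ [PySem.Chars.lowerChar (PySem.List.pyGetD s 5 '-')]
             ++ PySem.List.slice s (some 6) none)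

-- ===== PRECONDITION & SPEC =====
def Spec_get_display_window (sequence : String) (center_idx : Int) (out : String) : Prop := out = get_display_window_alt sequence center_idx
instance (sequence : String) (center_idx : Int) (out : String) : Decidable (Spec_get_display_window sequence center_idx out) := by unfold Spec_get_display_window; infer_instance

-- ===== CLAIM (what is proved, stated in full; the proofs are below) =====
def Claim_equal_get_display_window : Prop := ∀ (sequence : String) (center_idx : Int), Dom_get_display_window sequence center_idx → Spec_get_display_window sequence center_idx (get_display_window sequence center_idx)

-- ===== LEMMAS AND PROOFS =====

-- a map over an Int range whose values are all '-' is a replicate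
theorem pv_map_const_dash (a b : Int) (f : Int → Char)
    (h : ∀ k, a ≤ k → k < b → f k = '-') :
    (PySem.List.pyRange a b 1).map f = List.replicate (b - a).toNat '-' := by
  have h1 : (PySem.List.pyRange a b 1).map f
      = (PySem.List.pyRange a b 1).map (fun _ => '-') := by
    apply List.map_congr_left
    intro k hk
    rw [PySem.List.mem_pyRange_one] at hk
    exact h k hk.1 hk.2
  rw [h1, List.map_const', PySem.List.length_pyRange_one]

-- a map of in-range lookups over an Int range is a drop/take slice
theorem pv_map_pyGetD_range (cs : List Char) (a b : Int)
    (h0 : 0 ≤ a) (hb : b ≤ (cs.length : Int)) :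
    (PySem.List.pyRange a b 1).map (fun k => PySem.List.pyGetD cs k '-')
      = (cs.drop a.toNat).take (b.toNat - a.toNat) := by
  by_cases hab : a ≤ b
  · have hlen : (b - a).toNat = b.toNat - a.toNat := by omega
    rw [← hlen]
    induction hn : (b - a).toNat generalizing a with
    | zero =>
      rw [PySem.List.pyRange_one_eq_nil (by omega)]
      simp
    | succ m ih =>
      rw [PySem.List.pyRange_one_cons (by omega)]
      have ha' : 0 ≤ a + 1 := by omega
      have hd : PySem.List.pyGetD cs a '-' = cs[a.toNat]'(by omega) := by
        rw [PySem.List.pyGetD_eq_getElem cs '-' h0 (by omega)]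
      have hdrop : cs.drop a.toNat
          = cs[a.toNat]'(by omega) :: cs.drop (a + 1).toNat := by
        have : (a + 1).toNat = a.toNat + 1 := by omega
        rw [this, List.drop_eq_getElem_cons (by omega)]
      rw [List.map_cons, hd, hdrop, List.take_succ_cons]
      congr 1
      exact ih (a + 1) ha' (by omega) (by omega) (by omega)
  · rw [PySem.List.pyRange_one_eq_nil (by omega)]
    have h : b.toNat - a.toNat = 0 := by omega
    simp [h]

theorem get_display_window_eq (sequence : String) (center_idx : Int) :
    get_display_window sequence center_idx = get_display_window_alt sequence center_idx := by
  unfold get_display_window get_display_window_alt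
  set cs := sequence.toList with hcs
  set start := center_idx - 5 with hstart
  set stop := center_idx + 6 with hstop
  set n : Int := (cs.length : Int) with hn
  have hn0 : 0 ≤ n := by positivity
  -- A's loop as a map
  have hfold : ∀ (f : Int → Char) (l : List Int),
      l.foldl (fun acc k => acc ++ [f k]) [] = l.map f := by
    intro f l
    simpa using (PySem.List.foldl_append_singleton_eq_map f l [])
  simp only [hfold]
  set f : Int → Char :=
    fun k => if k < 0 ∨ n ≤ k then '-' else PySem.List.pyGetD cs k '-' with hf
  -- B's three pieces
  set left := PySem.List.pyRepeat ['-'] (max 0 (min stop 0 - start)) with hleft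
  set body := PySem.List.slice cs (some (max 0 start)) (some (max 0 (min n stop))) with hbody
  set right := PySem.List.pyRepeat ['-'] (max 0 (stop - max start n)) with hright
  have hmain : (PySem.List.pyRange start stop 1).map f = left ++ body ++ right := by
    rw [hleft, hright, PySem.List.pyRepeat_singleton, PySem.List.pyRepeat_singleton]
    by_cases h1 : stop ≤ 0
    · -- window entirely left of the string
      rw [pv_map_const_dash _ _ _ (fun k hk1 hk2 => by simp [hf]; omega)]
      rw [hbody, PySem.List.slice_toNat cs (by omega) (by omega)]
      have : (max 0 (min n stop)).toNat - (max 0 start).toNat = 0 := by omega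
      rw [this]
      simp
      omega
    · by_cases h2 : n ≤ start
      · -- window entirely right of the string
        rw [pv_map_const_dash _ _ _ (fun k hk1 hk2 => by simp [hf]; omega)]
        rw [hbody, PySem.List.slice_toNat cs (by omega) (by omega)]
        have hd : (cs.drop (max 0 start).toNat) = [] := by
          apply List.drop_eq_nil_of_le; omega
        rw [hd]
        simp
        omega
      · -- overlapping case: split the range at m1 and m2
        rw [not_le] at h1; rw [not_le] at h2
        set m1 := max start 0 with hm1
        set m2 := max start (min n stop) with hm2
        have hsplit : PySem.List.pyRange start stop 1
            = PySem.List.pyRange start m1 1 ++ PySem.List.pyRange m1 m2 1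
              ++ PySem.List.pyRange m2 stop 1 := by
          rw [PySem.List.pyRange_one_append start m1 stop (by omega) (by omega),
              PySem.List.pyRange_one_append m1 m2 stop (by omega) (by omega),
              List.append_assoc]
        rw [hsplit, List.map_append, List.map_append]
        congr 1
        congr 1
        · rw [pv_map_const_dash _ _ _ (fun k hk1 hk2 => by simp [hf]; omega)]
          congr 1
          omega
        · have hmid : (PySem.List.pyRange m1 m2 1).map f
              = (PySem.List.pyRange m1 m2 1).map (fun k => PySem.List.pyGetD cs k '-') := by
            apply List.map_congr_left
            intro k hk
            rw [PySem.List.mem_pyRange_one] at hk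
            simp only [hf]
            rw [if_neg (by omega)]
          rw [hmid, pv_map_pyGetD_range cs m1 m2 (by omega) (by omega),
              hbody, PySem.List.slice_toNat cs (by omega) (by omega)]
          have e1 : (max 0 start).toNat = m1.toNat := by omega
          rw [e1]
          congr 1
          omega
        · rw [pv_map_const_dash _ _ _ (fun k hk1 hk2 => by simp [hf]; omega)]
          congr 1
          omega
  rw [hmain]
  -- the lowercase step: set at index 5 = take 5 ++ [·] ++ drop 6
  set s := left ++ body ++ right with hs
  have hslen : 11 ≤ s.length := by
    rw [← hmain, List.length_map, PySem.List.length_pyRange_one]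
    omega
  rw [PySem.List.pySetD_of_nonneg s _ (by omega),
      PySem.List.slice_to s (by omega), PySem.List.slice_from s (by omega)]
  rw [List.set_eq_take_append_cons_drop, if_pos (show (5:Int).toNat < s.length by omega)]
  have h56 : (5 : Int).toNat + 1 = (6 : Int).toNat := by decide
  rw [h56]
  simp

-- ===== VERDICT (by name: the statement is the Claim_ definition above) =====
theorem get_display_window_spec : Claim_equal_get_display_window := by
  intro sequence center_idx _
  unfold Spec_get_display_window
  exact get_display_window_eq sequence center_idx
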